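-- pv_equiv track=rewrite | github.com/wheydant/Complete-DSA-In-Java | KunalKushwaha/Assignments/Tree/TreeOfCoPrimes.py | getCoprimes
-- ===== SOURCE A (Python) =====
-- from collections import defaultdict
-- import math
-- from typing import List
--
-- def getCoprimes(nums: List[int], edges: List[List[int]]) -> List[int]:
--     n = len(nums)
--
--     tree = defaultdict(list)
--     for u, v in edges:
--         tree[u].append(v)
--         tree[v].append(u)
--
--     # Precompute coprimes
--     coprime_map = {}
--     for i in range(1, 51):
--         coprime_map[i] = []
--         for j in range(1, 51):
--             if math.gcd(i, j) == 1:
--                 coprime_map[i].append(j)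
--
--     res = [-1]*n
--     #Stores ancestor as we go down value -> node, depth
--     ancestor_map = {}
--
--     def dfs(node, parent, depth):
--         val = nums[node]
--
--         best_depth = -1
--         best_node = -1
--         for c in coprime_map[val]:
--             if c in ancestor_map:
--                 anc_node, anc_depth = ancestor_map[c]
--                 if anc_depth > best_depth:
--                     best_depth = anc_depth
--                     best_node = anc_node
--
--         res[node] = best_node
--
--         # save current state -- Importand as coming back from 3 to 4 we need to store anc till 1 and remove 3
--         prev = ancestor_map.get(val)
--         ancestor_map[val] = (node, depth)
--
--         #DFS
--         for nei in tree[node]: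
--             if nei != parent:
--                 dfs(nei, node, depth + 1)
--
--         if prev:
--             ancestor_map[val] = prev
--         else:
--             #Handles Root
--             del ancestor_map[val]
--
--     dfs(0, -1, 0)
--     return res
-- ===== SOURCE B (Python) =====
-- import math
-- from collections import defaultdict
--
--
-- def getCoprimes(nums, edges):
--     n = len(nums)
--
--     adj = defaultdict(list)
--     for u, v in edges:
--         adj[u].append(v)
--         adj[v].append(u)
--
--     res = [-1] * n
--
--     # Walk the tree carrying an immutable linked chain of ancestors
--     # (nearest first); the answer for a node is the first coprime
--     # ancestor on the chain.  No coprime table, no per-value map,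
--     # no save/restore.
--     def walk(node, parent, path):
--         val = nums[node]
--         ans = -1
--         p = path
--         while p is not None:
--             anc, p = p
--             if math.gcd(val, nums[anc]) == 1:
--                 ans = anc
--                 break
--         res[node] = ans
--         child_path = (node, path)
--         for nei in adj[node]:
--             if nei != parent:
--                 walk(nei, node, child_path)
--
--     walk(0, -1, None)
--     return res
-- ===== Notes on version B (the rewrite author's own statement) =====
-- stated objective: simpler
-- what changed: Replaces the precomputed 1..50 coprime table and the mutable value->(node,depth) ancestor map with save/restore by a plain DFS that carries an immutable linked chain of ancestors and answers each node by scanning the chain nearest-first for the first gcd==1 ancestor.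
-- outside the precondition, e.g. on getCoprimes([1], [[0, 0]]): A returns [0], B returns [0]; on getCoprimes([7, 5], [[0, -1]]): A returns [-1, -1], B returns [-1, -1]
import Mathlib
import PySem

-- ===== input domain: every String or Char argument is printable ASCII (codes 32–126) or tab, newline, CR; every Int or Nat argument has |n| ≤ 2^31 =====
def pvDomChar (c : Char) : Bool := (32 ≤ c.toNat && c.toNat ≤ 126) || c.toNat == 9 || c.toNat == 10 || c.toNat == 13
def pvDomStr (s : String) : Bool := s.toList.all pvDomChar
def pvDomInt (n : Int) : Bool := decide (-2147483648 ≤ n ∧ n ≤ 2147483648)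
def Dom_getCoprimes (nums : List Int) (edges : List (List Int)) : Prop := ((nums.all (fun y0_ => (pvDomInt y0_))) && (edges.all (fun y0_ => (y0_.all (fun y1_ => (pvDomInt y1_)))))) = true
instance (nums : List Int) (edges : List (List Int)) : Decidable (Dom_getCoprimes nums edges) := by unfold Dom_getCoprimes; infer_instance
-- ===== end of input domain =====

-- B replaces A's coprime table + mutable value->(node,depth) ancestor map (with save/restore)
-- by a DFS carrying an immutable ancestor chain scanned nearest-first (objective: simpler).

-- ===== PORT A =====

-- adjacency dict built exactly as A's defaultdict loop (edges not of shape [u,v] raise in Python; excluded by Pre_)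
def pvTree (edges : List (List Int)) : PySem.Dict Int (List Int) :=
  edges.foldl (fun d e =>
    match e with
    | [u, v] => (d.modify u [] (· ++ [v])).modify v [] (· ++ [u])
    | _ => d) PySem.Dict.empty

-- coprime_map: for i in 1..50 the list of j in 1..50 with gcd(i,j)==1 (math.gcd on positives = Int.gcd, exact here)
def pvCopMap : PySem.Dict Int (List Int) :=
  (PySem.List.pyRange 1 51 1).foldl (fun m i =>
    m.insert i ((PySem.List.pyRange 1 51 1).foldl
      (fun acc j => if ((Int.gcd i j : Int) == 1) then acc ++ [j] else acc) [])) PySem.Dict.empty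

-- the recursive dfs, fueled (the fuel is a generous bound on the recursion depth of any
-- terminating run; on inputs satisfying Pre_ the depth is at most n); state = (ancestor_map, res)
def pvDfsA (nums : List Int) (tree : PySem.Dict Int (List Int)) :
    Nat → Int → Int → Int → PySem.Dict Int (Int × Int) → List Int →
    (PySem.Dict Int (Int × Int) × List Int)
  | 0, _, _, _, anc, res => (anc, res)
  | fuel + 1, node, parent, depth, anc, res =>
    let val := (PySem.List.pyGet? nums node).getD 0
    let best := (pvCopMap.getD val []).foldl (fun (b : Int × Int) c =>
      match anc.get? c with
      | some ad => if ad.2 > b.1 then (ad.2, ad.1) else b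
      | none => b) (-1, -1)
    let res1 := PySem.List.pySetD res node best.2
    let prev := anc.get? val
    let anc1 := anc.insert val (node, depth)
    let st := (tree.getD node []).foldl (fun (st : PySem.Dict Int (Int × Int) × List Int) nei =>
      if nei ≠ parent then pvDfsA nums tree fuel nei node (depth + 1) st.1 st.2 else st) (anc1, res1)
    let anc2 := match prev with
      | some p => st.1.insert val p
      | none => st.1.erase val
    (anc2, st.2)

def getCoprimes (nums : List Int) (edges : List (List Int)) : List Int :=
  (pvDfsA nums (pvTree edges) (nums.length + 2 * edges.length + 2) 0 (-1) 0 PySem.Dict.empty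
    (List.replicate nums.length (-1))).2

-- ===== PORT B =====

-- Source B builds the same defaultdict adjacency
def pvAdjB (edges : List (List Int)) : PySem.Dict Int (List Int) :=
  edges.foldl (fun d e =>
    match e with
    | [u, v] => (d.modify u [] (· ++ [v])).modify v [] (· ++ [u])
    | _ => d) PySem.Dict.empty

-- walk: path is Source B's linked chain (node, parent-chain), nearest ancestor first
def pvWalkB (nums : List Int) (adj : PySem.Dict Int (List Int)) :
    Nat → Int → Int → List Int → List Int → List Int
  | 0, _, _, _, res => res
  | fuel + 1, node, parent, path, res =>
    let val := (PySem.List.pyGet? nums node).getD 0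
    let ans := (path.find? (fun a =>
      ((Int.gcd val ((PySem.List.pyGet? nums a).getD 0) : Int) == 1))).getD (-1)
    let res1 := PySem.List.pySetD res node ans
    (adj.getD node []).foldl (fun r nei =>
      if nei ≠ parent then pvWalkB nums adj fuel nei node (node :: path) r else r) res1

def getCoprimes_alt (nums : List Int) (edges : List (List Int)) : List Int :=
  pvWalkB nums (pvAdjB edges) (nums.length + 2 * edges.length + 2) 0 (-1) []
    (List.replicate nums.length (-1))

-- ===== PRECONDITION & SPEC =====

def pvEKey (e : List Int) : Int × Int :=
  match e with
  | [u, v] => (min u v, max u v)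
  | _ => (0, 0)

def pvTouch (c : List Int) (e : List Int) : Bool :=
  match e with
  | [u, _] => decide (u ∈ c)
  | _ => false

-- an edge may not leave the component c, nor be a self-loop inside it
def pvClosedEdge (c : List Int) (e : List Int) : Bool :=
  match e with
  | [u, v] => decide ((u ∈ c ∨ v ∈ c) → (u ∈ c ∧ v ∈ c ∧ u ≠ v))
  | _ => true

-- one closure step: add both endpoints of every edge touching the set
def pvStep (edges : List (List Int)) (s : List Int) : List Int :=
  edges.foldl (fun s e =>
    match e with
    | [u, v] => if u ∈ s ∨ v ∈ s then PySem.Set.add (PySem.Set.add s u) v else s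
    | _ => s) s

-- vertices reachable from 0 (k closure steps; k = #edges + 1 reaches the whole component)
def pvReach (edges : List (List Int)) : Nat → List Int
  | 0 => [0]
  | k + 1 => pvStep edges (pvReach edges k)

-- Pre_: n ≥ 1, every edge is a pair, and the component of node 0 (the only part the dfs
-- visits) is well-formed: its vertices are real non-negative indices carrying values in
-- 1..50 (else A raises KeyError, or relies on negative-index wraparound), it has no
-- self-loops, and it is a tree (#distinct edges = #vertices - 1; on a cyclic component A
-- hits RecursionError).  This excludes a few inputs on which A still returns (a self-loop
-- or a negative neighbour index in the component): see the cited examples, where A and B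
-- agree anyway.
def Pre_getCoprimes (nums : List Int) (edges : List (List Int)) : Prop :=
  (∀ e ∈ edges, e.length = 2) ∧
  (0 : Int) ∈ pvReach edges (edges.length + 1) ∧
  (∀ v ∈ pvReach edges (edges.length + 1),
    0 ≤ v ∧ v < (nums.length : Int) ∧
    1 ≤ (PySem.List.pyGet? nums v).getD 0 ∧ (PySem.List.pyGet? nums v).getD 0 ≤ 50) ∧
  (∀ e ∈ edges, pvClosedEdge (pvReach edges (edges.length + 1)) e = true) ∧
  (PySem.Set.ofList ((edges.filter
      (fun e => pvTouch (pvReach edges (edges.length + 1)) e)).map pvEKey)).length + 1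
    = (pvReach edges (edges.length + 1)).length

instance (nums : List Int) (edges : List (List Int)) : Decidable (Pre_getCoprimes nums edges) := by
  unfold Pre_getCoprimes; infer_instance

def pvWitness_getCoprimes : List Int × List (List Int) := ([2, 3], [[0, 1]])

def Spec_getCoprimes (nums : List Int) (edges : List (List Int)) (out : List Int) : Prop :=
  out = getCoprimes_alt nums edges
instance (nums : List Int) (edges : List (List Int)) (out : List Int) : Decidable (Spec_getCoprimes nums edges out) := by unfold Spec_getCoprimes; infer_instance

-- ===== CLAIM (what is proved, stated in full; the proofs are below) =====
def Claim_equal_getCoprimes : Prop := ∀ (nums : List Int) (edges : List (List Int)), Dom_getCoprimes nums edges → Pre_getCoprimes nums edges → Spec_getCoprimes nums edges (getCoprimes nums edges)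

-- ===== LEMMAS AND PROOFS =====

-- A's ancestor_map as a function of B's ancestor chain (nearest ancestor first)
def pvBuildAnc (nums : List Int) : List Int → PySem.Dict Int (Int × Int)
  | [] => PySem.Dict.empty
  | x :: p => (pvBuildAnc nums p).insert ((PySem.List.pyGet? nums x).getD 0) (x, (p.length : Int))

lemma pvAncNodup (nums : List Int) : ∀ p : List Int, (pvBuildAnc nums p).keys.Nodup
  | [] => PySem.Dict.nodup_keys_empty
  | _ :: p => PySem.Dict.nodup_keys_insert _ _ _ (pvAncNodup nums p)

lemma pvAncGetCons (nums : List Int) (x : Int) (p : List Int) (c : Int) :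
    (pvBuildAnc nums (x :: p)).get? c =
      if c = (PySem.List.pyGet? nums x).getD 0 then some (x, (p.length : Int))
      else (pvBuildAnc nums p).get? c := by
  simp [pvBuildAnc, PySem.Dict.get?_insert]

lemma pvAncDepthLt (nums : List Int) : ∀ (p : List Int) (c a d : Int),
    (pvBuildAnc nums p).get? c = some (a, d) → d < (p.length : Int) := by
  intro p
  induction p with
  | nil => intro c a d h; rw [pvBuildAnc, PySem.Dict.get?_empty] at h; cases h
  | cons x p ih =>
    intro c a d h
    rw [pvAncGetCons] at h
    split at h
    · cases h; simp only [List.length_cons]; push_cast; omega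
    · have := ih _ _ _ h
      simp only [List.length_cons]
      push_cast
      omega

-- restoring a saved value is a no-op on the dict
lemma pvDictInsertSelf (d : PySem.Dict Int (Int × Int)) (k : Int) (v : Int × Int)
    (hnd : d.keys.Nodup) (h : d.get? k = some v) : d.insert k v = d := by
  have hcont : d.contains k = true := by
    rw [PySem.Dict.contains_eq_isSome_get?, h]; rfl
  apply PySem.Dict.ext
  rw [PySem.Dict.items_insert_of_contains d v hcont]
  have hfix : ∀ q ∈ d.items, (if (q.1 == k) = true then (k, v) else q) = q := by
    intro q hq
    by_cases hk : q.1 = k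
    · have hget : d.get? q.1 = some q.2 :=
        (PySem.Dict.get?_eq_some_iff_mem_items d q.1 q.2 hnd).mpr hq
      have hv : v = q.2 := by
        rw [hk, h] at hget
        injection hget
      rw [if_pos (by simp [hk]), hv, ← hk]
    · rw [if_neg (by simp [hk])]
  rw [List.map_congr_left hfix, List.map_id']

lemma pvDictEraseInsert (d : PySem.Dict Int (Int × Int)) (k : Int) (v : Int × Int)
    (h : d.get? k = none) : (d.insert k v).erase k = d := by
  have hcont : d.contains k = false := by
    rw [PySem.Dict.contains_eq_isSome_get?, h]; rfl
  apply PySem.Dict.ext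
  show List.filter _ (d.insert k v).items = d.items
  rw [PySem.Dict.items_insert_of_not_contains d v hcont, List.filter_append]
  have hno : ∀ q ∈ d.items, (!(q.1 == k)) = true := by
    intro q hq
    have : d.items.find? (fun p => p.1 == k) = none := by
      unfold PySem.Dict.get? at h
      cases hf : d.items.find? (fun p => p.1 == k) with
      | none => rfl
      | some p => rw [hf] at h; cases h
    have := List.find?_eq_none.mp this q hq
    simpa using this
  rw [List.filter_eq_self.mpr hno]
  simp

-- lookups in the coprime table
lemma pvFoldInsGetD_notmem (L : Int → List Int) :
    ∀ (ks : List Int) (d : PySem.Dict Int (List Int)) (v : Int), v ∉ ks →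
      (ks.foldl (fun m i => m.insert i (L i)) d).getD v [] = d.getD v [] := by
  intro ks
  induction ks with
  | nil => intro d v _; rfl
  | cons k ks ih =>
    intro d v hv
    rw [List.foldl_cons, ih _ _ (fun h => hv (List.mem_cons_of_mem _ h)),
      PySem.Dict.getD_insert_of_ne _ _ _
        (fun h => hv (by rw [h]; exact List.mem_cons_self))]

lemma pvFoldInsGetD_mem (L : Int → List Int) :
    ∀ (ks : List Int) (d : PySem.Dict Int (List Int)) (v : Int), v ∈ ks → ks.Nodup →
      (ks.foldl (fun m i => m.insert i (L i)) d).getD v [] = L v := by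
  intro ks
  induction ks with
  | nil => intro d v hv _; cases hv
  | cons k ks ih =>
    intro d v hv hnd
    rw [List.foldl_cons]
    rcases List.mem_cons.mp hv with h | h
    · subst h
      rw [pvFoldInsGetD_notmem _ _ _ _ (List.nodup_cons.mp hnd).1,
        PySem.Dict.getD_insert_self]
    · exact ih _ _ h (List.nodup_cons.mp hnd).2

lemma pvRangeNodup : (PySem.List.pyRange 1 51 1).Nodup := by decide

lemma pvCopGetD (v : Int) (h1 : 1 ≤ v) (h2 : v < 51) :
    pvCopMap.getD v [] =
      (PySem.List.pyRange 1 51 1).filter (fun j => ((Int.gcd v j : Int) == 1)) := by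
  have h := pvFoldInsGetD_mem
    (fun i => (PySem.List.pyRange 1 51 1).foldl
      (fun acc j => if ((Int.gcd i j : Int) == 1) then acc ++ [j] else acc) [])
    (PySem.List.pyRange 1 51 1) PySem.Dict.empty v
    (PySem.List.mem_pyRange_one.mpr ⟨h1, h2⟩) pvRangeNodup
  unfold pvCopMap
  rw [h]
  beta_reduce
  rw [PySem.List.foldl_append_if_eq_filter]
  simp

-- the best-candidate fold: absorbing state
lemma pvFoldKeep (nums : List Int) (q : List Int) :
    ∀ (cs : List Int) (b : Int × Int),
      (∀ c ∈ cs, ∀ ad : Int × Int, (pvBuildAnc nums q).get? c = some ad → ¬ (ad.2 > b.1)) →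
      cs.foldl (fun (b : Int × Int) c =>
        match (pvBuildAnc nums q).get? c with
        | some ad => if ad.2 > b.1 then (ad.2, ad.1) else b
        | none => b) b = b := by
  intro cs
  induction cs with
  | nil => intro b _; rfl
  | cons c cs ih =>
    intro b hb
    rw [List.foldl_cons]
    cases hg : (pvBuildAnc nums q).get? c with
    | none => simp only [hg]; exact ih b (fun c' hc' => hb c' (List.mem_cons_of_mem _ hc'))
    | some ad =>
      simp only [hg, if_neg (hb c List.mem_cons_self ad hg)]
      exact ih b (fun c' hc' => hb c' (List.mem_cons_of_mem _ hc'))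

-- the best-candidate fold: stays below a strict bound
lemma pvFoldLt (nums : List Int) (q : List Int) (Lb : Int) :
    ∀ (cs : List Int) (b : Int × Int),
      (∀ c ∈ cs, ∀ ad : Int × Int, (pvBuildAnc nums q).get? c = some ad → ad.2 < Lb) →
      b.1 < Lb →
      (cs.foldl (fun (b : Int × Int) c =>
        match (pvBuildAnc nums q).get? c with
        | some ad => if ad.2 > b.1 then (ad.2, ad.1) else b
        | none => b) b).1 < Lb := by
  intro cs
  induction cs with
  | nil => intro b _ hb; exact hb
  | cons c cs ih =>
    intro b hcs hb
    rw [List.foldl_cons]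
    cases hg : (pvBuildAnc nums q).get? c with
    | none => simp only [hg]; exact ih b (fun c' hc' => hcs c' (List.mem_cons_of_mem _ hc')) hb
    | some ad =>
      simp only [hg]
      split
      · exact ih _ (fun c' hc' => hcs c' (List.mem_cons_of_mem _ hc'))
          (hcs c List.mem_cons_self ad hg)
      · exact ih b (fun c' hc' => hcs c' (List.mem_cons_of_mem _ hc')) hb

-- A's argmax over the coprime table equals B's nearest-first scan of the chain
lemma pvBestAux (nums : List Int) (val : Int) :
    ∀ (path : List Int),
      (∀ x ∈ path, 1 ≤ (PySem.List.pyGet? nums x).getD 0 ∧ (PySem.List.pyGet? nums x).getD 0 ≤ 50) →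
      (((PySem.List.pyRange 1 51 1).filter (fun j => ((Int.gcd val j : Int) == 1))).foldl
        (fun (b : Int × Int) c =>
          match (pvBuildAnc nums path).get? c with
          | some ad => if ad.2 > b.1 then (ad.2, ad.1) else b
          | none => b) (-1, -1)).2
      = (path.find? (fun a =>
          ((Int.gcd val ((PySem.List.pyGet? nums a).getD 0) : Int) == 1))).getD (-1) := by
  intro path
  induction path with
  | nil =>
    intro _
    rw [pvFoldKeep nums [] _ _ (by
      intro c _ ad had
      rw [pvBuildAnc, PySem.Dict.get?_empty] at had
      cases had)]
    simp
  | cons x p ih =>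
    intro hpath
    have hx := hpath x List.mem_cons_self
    set c0 := (PySem.List.pyGet? nums x).getD 0 with hc0
    by_cases hgcd : (Int.gcd val c0 : Int) = 1
    · -- the head of the chain is coprime: it wins the argmax
      have hc0mem : c0 ∈ (PySem.List.pyRange 1 51 1).filter
          (fun j => ((Int.gcd val j : Int) == 1)) := by
        rw [List.mem_filter]
        exact ⟨PySem.List.mem_pyRange_one.mpr ⟨hx.1, by omega⟩, by simp [hgcd]⟩
      obtain ⟨l1, l2, hsplit⟩ := List.append_of_mem hc0mem
      have hnd : (l1 ++ c0 :: l2).Nodup := by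
        rw [← hsplit]; exact pvRangeNodup.filter _
      have hmid := (List.nodup_cons.mp (List.nodup_middle.mp hnd)).1
      have hc0l1 : c0 ∉ l1 := fun h => hmid (List.mem_append_left _ h)
      have hc0l2 : c0 ∉ l2 := fun h => hmid (List.mem_append_right _ h)
      rw [hsplit, List.foldl_append, List.foldl_cons]
      have hbound : ∀ c, c ≠ c0 → ∀ ad : Int × Int,
          (pvBuildAnc nums (x :: p)).get? c = some ad → ad.2 < (p.length : Int) := by
        intro c hc ad had
        rw [pvAncGetCons, if_neg (hc0 ▸ hc)] at had
        exact pvAncDepthLt nums p _ _ _ had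
      have h1 : (l1.foldl (fun (b : Int × Int) c =>
          match (pvBuildAnc nums (x :: p)).get? c with
          | some ad => if ad.2 > b.1 then (ad.2, ad.1) else b
          | none => b) (-1, -1)).1 < (p.length : Int) := by
        apply pvFoldLt
        · intro c hc ad had
          exact hbound c (fun h => hc0l1 (h ▸ hc)) ad had
        · show (-1 : Int) < (p.length : Int)
          omega
      have hg0 : (pvBuildAnc nums (x :: p)).get? c0 = some (x, (p.length : Int)) := by
        rw [pvAncGetCons, if_pos rfl]
      simp only [hg0, gt_iff_lt, if_pos h1]
      rw [pvFoldKeep nums (x :: p) l2 _ (by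
        intro c hc ad had
        have := hbound c (fun h => hc0l2 (h ▸ hc)) ad had
        simp only [gt_iff_lt, not_lt]
        omega)]
      rw [List.find?_cons_of_pos (by simpa using hgcd)]
      simp
    · -- head not coprime: it is not in the candidate list, recurse on the tail
      have hcongr : ∀ (b : Int × Int),
          ∀ c ∈ (PySem.List.pyRange 1 51 1).filter (fun j => ((Int.gcd val j : Int) == 1)),
          (match (pvBuildAnc nums (x :: p)).get? c with
            | some ad => if ad.2 > b.1 then (ad.2, ad.1) else b
            | none => b)
          = (match (pvBuildAnc nums p).get? c with
            | some ad => if ad.2 > b.1 then (ad.2, ad.1) else b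
            | none => b) := by
        intro b c hc
        have hc1 : (Int.gcd val c : Int) = 1 := by
          have := (List.mem_filter.mp hc).2
          simpa using this
        have hne : c ≠ c0 := fun h => hgcd (h ▸ hc1)
        rw [pvAncGetCons, if_neg (hc0 ▸ hne)]
      rw [PySem.List.foldl_congr_mem _ _ _ _ hcongr]
      rw [ih (fun y hy => hpath y (List.mem_cons_of_mem _ hy))]
      rw [List.find?_cons_of_neg (by simpa using hgcd)]

-- the adjacency dict never leads out of a closed component
lemma pvTreeFoldClosed (C : List Int) :
    ∀ (es : List (List Int)) (d : PySem.Dict Int (List Int)),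
      (∀ e ∈ es, pvClosedEdge C e = true) →
      (∀ u x, u ∈ C → x ∈ d.getD u [] → x ∈ C) →
      ∀ u x, u ∈ C → x ∈ (es.foldl (fun d e =>
        match e with
        | [u, v] => (d.modify u [] (· ++ [v])).modify v [] (· ++ [u])
        | _ => d) d).getD u [] → x ∈ C := by
  intro es
  induction es with
  | nil => intro d _ hd; exact hd
  | cons e es ih =>
    intro d hes hd
    rw [List.foldl_cons]
    apply ih _ (fun e' he' => hes e' (List.mem_cons_of_mem _ he'))
    have he := hes e List.mem_cons_self
    match e with
    | [] => intro u x hu hx; exact hd u x hu hx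
    | [_] => intro u x hu hx; exact hd u x hu hx
    | (a :: b :: _ :: _) => intro u x hu hx; exact hd u x hu hx
    | [a, b] =>
      simp only [pvClosedEdge, decide_eq_true_eq] at he
      intro u x hu hx
      simp only [PySem.Dict.getD_modify] at hx
      by_cases hub : u = b
      · have hbC : b ∈ C := hub ▸ hu
        have habC := he (Or.inr hbC)
        rw [if_pos hub] at hx
        rcases List.mem_append.mp hx with h | h
        · by_cases hba : b = a
          · rw [if_pos hba] at h
            rcases List.mem_append.mp h with h' | h'
            · exact hd a x habC.1 h'
            · rw [List.mem_singleton.mp h']; exact habC.2.1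
          · rw [if_neg hba] at h
            exact hd b x hbC h
        · rw [List.mem_singleton.mp h]; exact habC.1
      · rw [if_neg hub] at hx
        by_cases hua : u = a
        · have haC : a ∈ C := hua ▸ hu
          have habC := he (Or.inl haC)
          rw [if_pos hua] at hx
          rcases List.mem_append.mp hx with h | h
          · exact hd a x haC h
          · rw [List.mem_singleton.mp h]; exact habC.2.1
        · rw [if_neg hua] at hx
          exact hd u x hu hx

-- the simulation: A's dfs, run with the dict matching B's chain, restores the dict and
-- produces exactly B's res
lemma pvSim (nums : List Int) (tree : PySem.Dict Int (List Int)) (C : List Int)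
    (HC : ∀ v ∈ C, 0 ≤ v ∧ v < (nums.length : Int) ∧
      1 ≤ (PySem.List.pyGet? nums v).getD 0 ∧ (PySem.List.pyGet? nums v).getD 0 ≤ 50)
    (Htree : ∀ u x, u ∈ C → x ∈ tree.getD u [] → x ∈ C) :
    ∀ (fuel : Nat) (node parent : Int) (path : List Int) (res : List Int),
      node ∈ C → (∀ x ∈ path, x ∈ C) →
      pvDfsA nums tree fuel node parent (path.length : Int) (pvBuildAnc nums path) res
        = (pvBuildAnc nums path, pvWalkB nums tree fuel node parent path res) := by
  intro fuel
  induction fuel with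
  | zero => intro node parent path res _ _; rfl
  | succ fuel ih =>
    intro node parent path res hnode hp
    have hvnode := HC node hnode
    simp only [pvDfsA, pvWalkB]
    rw [pvCopGetD _ hvnode.2.2.1 (by omega)]
    rw [pvBestAux nums _ path (fun x hx => ⟨(HC x (hp x hx)).2.2.1, (HC x (hp x hx)).2.2.2⟩)]
    have haux : ∀ (l : List Int), (∀ x ∈ l, x ∈ C) →
        ∀ (r : List Int),
        l.foldl (fun (st : PySem.Dict Int (Int × Int) × List Int) nei =>
          if nei ≠ parent then
            pvDfsA nums tree fuel nei node ((path.length : Int) + 1) st.1 st.2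
          else st) (pvBuildAnc nums (node :: path), r)
        = (pvBuildAnc nums (node :: path),
           l.foldl (fun r nei =>
            if nei ≠ parent then pvWalkB nums tree fuel nei node (node :: path) r else r) r) := by
      intro l hl
      induction l with
      | nil => intro r; rfl
      | cons y ys ihl =>
        intro r
        simp only [List.foldl_cons]
        by_cases hy : y ≠ parent
        · rw [if_pos hy, if_pos hy]
          have hyv := hl y List.mem_cons_self
          have hlen : ((path.length : Int) + 1) = (((node :: path).length : Int)) := by
            simp
          rw [hlen]
          rw [ih y node (node :: path) r hyv
            (by intro z hz; rcases List.mem_cons.mp hz with h | h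
                · exact h ▸ hnode
                · exact hp z h)]
          exact ihl (fun z hz => hl z (List.mem_cons_of_mem _ hz)) _
        · rw [if_neg hy, if_neg hy]
          exact ihl (fun z hz => hl z (List.mem_cons_of_mem _ hz)) _
    have hanc1 : (pvBuildAnc nums path).insert ((PySem.List.pyGet? nums node).getD 0)
        (node, (path.length : Int)) = pvBuildAnc nums (node :: path) := rfl
    rw [hanc1, haux (tree.getD node []) (fun x hx => Htree node x hnode hx)]
    cases hprev : (pvBuildAnc nums path).get? ((PySem.List.pyGet? nums node).getD 0) with
    | some pr =>
      simp only [hprev]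
      rw [show pvBuildAnc nums (node :: path)
          = (pvBuildAnc nums path).insert ((PySem.List.pyGet? nums node).getD 0)
            (node, (path.length : Int)) from rfl,
        PySem.Dict.insert_insert_self,
        pvDictInsertSelf _ _ _ (pvAncNodup nums path) hprev]
    | none =>
      simp only [hprev]
      rw [show pvBuildAnc nums (node :: path)
          = (pvBuildAnc nums path).insert ((PySem.List.pyGet? nums node).getD 0)
            (node, (path.length : Int)) from rfl,
        pvDictEraseInsert _ _ _ hprev]

-- ===== VERDICT (by name: the statement is the Claim_ definition above) =====
theorem getCoprimes_spec : Claim_equal_getCoprimes := by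
  intro nums edges _ hpre
  obtain ⟨_, h0C, hC, hclosed, _⟩ := hpre
  unfold Spec_getCoprimes getCoprimes getCoprimes_alt
  have hadj : pvAdjB edges = pvTree edges := rfl
  rw [hadj]
  have Htree : ∀ u x, u ∈ pvReach edges (edges.length + 1) →
      x ∈ (pvTree edges).getD u [] → x ∈ pvReach edges (edges.length + 1) := by
    apply pvTreeFoldClosed _ _ _ hclosed
    intro u x _ hx
    rw [PySem.Dict.getD_empty] at hx
    cases hx
  have h := pvSim nums (pvTree edges) (pvReach edges (edges.length + 1)) hC Htree
    (nums.length + 2 * edges.length + 2) 0 (-1) [] (List.replicate nums.length (-1)) h0C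
    (by intro x hx; cases hx)
  exact congrArg Prod.snd h
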